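-- pv_equiv track=rewrite | github.com/alexander2618/MedLA | test/graph/graph.py | add_n_to_content
-- ===== SOURCE A (Python) =====
-- def add_n_to_content(content):
--
--     c_list = content.split(' ')
--     conter = 0
--     out = ''
--     for con in c_list:
--         conter += 1
--         out += con
--         if conter == 2:
--             out += '\n'
--             conter = 0
--         else:
--             out += ' '
--     return out
-- ===== SOURCE B (Python) =====
-- def add_n_to_content(content):
--     tokens = content.split(' ')
--     parts = []
--     i = 0
--     while i + 1 < len(tokens):
--         parts.append(tokens[i] + ' ' + tokens[i + 1] + '\n')
--         i += 2
--     if i < len(tokens):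
--         parts.append(tokens[i] + ' ')
--     return ''.join(parts)
-- ===== Notes on version B (the rewrite author's own statement) =====
-- stated objective: alternative
-- what changed: B replaces A's per-token running counter and growing-string branch with pair-at-a-time chunking of the token list into finished two-token pieces (newline-terminated, plus a space-terminated odd tail) joined at the end.
import Mathlib
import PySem

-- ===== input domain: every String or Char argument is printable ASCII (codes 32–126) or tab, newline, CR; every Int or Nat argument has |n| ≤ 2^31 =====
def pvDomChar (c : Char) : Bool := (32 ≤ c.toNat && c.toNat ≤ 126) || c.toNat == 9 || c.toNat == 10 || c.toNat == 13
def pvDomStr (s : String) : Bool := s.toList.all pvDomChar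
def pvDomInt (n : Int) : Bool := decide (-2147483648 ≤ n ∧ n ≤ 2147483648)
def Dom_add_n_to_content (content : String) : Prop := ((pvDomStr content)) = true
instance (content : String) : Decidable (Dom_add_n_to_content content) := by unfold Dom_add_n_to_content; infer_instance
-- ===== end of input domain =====

-- B chunks the token list two at a time into finished pieces and joins them, instead of A's running counter with a growing string (alternative decomposition, same cost).

-- ===== PORT A =====
-- A's for-loop over the tokens, carrying (conter, out).
def pvALoop : List String → Int → String → String
  | [], _, out => out
  | con :: rest, conter, out =>
    let conter := conter + 1
    let out := out ++ con
    if conter == 2 then pvALoop rest 0 (out ++ "\n")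
    else pvALoop rest conter (out ++ " ")

def add_n_to_content (content : String) : String :=
  pvALoop ((PySem.Str.split? content " ").getD []) 0 ""

-- ===== PORT B =====
-- Source B's while-loop: consume tokens two at a time, odd leftover gets "tok ".
def pvBChunks : List String → List String
  | t1 :: t2 :: rest => (t1 ++ " " ++ t2 ++ "\n") :: pvBChunks rest
  | [t] => [t ++ " "]
  | [] => []

def add_n_to_content_alt (content : String) : String :=
  PySem.Str.join "" (pvBChunks ((PySem.Str.split? content " ").getD []))

-- ===== PRECONDITION & SPEC =====
def Spec_add_n_to_content (content : String) (out : String) : Prop := out = add_n_to_content_alt content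
instance (content : String) (out : String) : Decidable (Spec_add_n_to_content content out) := by unfold Spec_add_n_to_content; infer_instance

-- ===== CLAIM (what is proved, stated in full; the proofs are below) =====
def Claim_equal_add_n_to_content : Prop := ∀ (content : String), Dom_add_n_to_content content → Spec_add_n_to_content content (add_n_to_content content)

-- ===== LEMMAS AND PROOFS =====

theorem pvJoin_cons (x : String) (l : List String) :
    PySem.Str.join "" (x :: l) = x ++ PySem.Str.join "" l := by
  cases l with
  | nil => simp [PySem.Str.join, PySem.Chars.join, List.intercalate]
  | cons y ys =>
    simp only [PySem.Str.join, List.map, String.toList_empty, PySem.Chars.join_cons_cons,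
      String.ofList_append]
    simp

theorem pvLoop_eq (ts : List String) : ∀ out : String,
    pvALoop ts 0 out = out ++ PySem.Str.join "" (pvBChunks ts) := by
  induction ts using pvBChunks.induct with
  | case1 t1 t2 rest ih =>
    intro out
    simp [pvALoop, pvBChunks, pvJoin_cons, ih, String.append_assoc]
  | case2 t =>
    intro out
    simp [pvALoop, pvBChunks, PySem.Str.join, String.append_assoc]
  | case3 =>
    intro out
    simp [pvALoop, pvBChunks, PySem.Str.join, PySem.Chars.join_nil]

-- ===== VERDICT (by name: the statement is the Claim_ definition above) =====
theorem add_n_to_content_spec : Claim_equal_add_n_to_content := by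
  intro content _
  unfold Spec_add_n_to_content add_n_to_content add_n_to_content_alt
  rw [pvLoop_eq]
  simp
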